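-- pv_equiv track=rewrite | github.com/ViacheslavGuskov/DICT_python_education_Guskov_Viacheslav | Dominoes/Dominoes.py | count_price
-- ===== SOURCE A (Python) =====
-- def count_price(domino_snake, computer_pieces):
--     total_list = []
--     for one_p in domino_snake:
--         total_list += one_p
--     for one_p in computer_pieces:
--         total_list += one_p
--     price_list = []
--     for one_price in range(7):
--         one_price_total = 0
--         for ii in total_list:
--             if one_price == ii:
--                 one_price_total += 1
--         price_list.append(one_price_total)
--     return price_list
-- ===== SOURCE B (Python) =====
-- def count_price(domino_snake, computer_pieces):
--     price_list = [0] * 7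
--     for piece in domino_snake:
--         for v in piece:
--             if 0 <= v < 7:
--                 price_list[v] += 1
--     for piece in computer_pieces:
--         for v in piece:
--             if 0 <= v < 7:
--                 price_list[v] += 1
--     return price_list
-- ===== Notes on version B (the rewrite author's own statement) =====
-- stated objective: faster
-- what changed: B builds the 7-bucket histogram in a single pass over the pieces (incrementing price_list[v] for each in-range pip) instead of flattening everything and rescanning the flattened list once per pip value 0-6.
import Mathlib
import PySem

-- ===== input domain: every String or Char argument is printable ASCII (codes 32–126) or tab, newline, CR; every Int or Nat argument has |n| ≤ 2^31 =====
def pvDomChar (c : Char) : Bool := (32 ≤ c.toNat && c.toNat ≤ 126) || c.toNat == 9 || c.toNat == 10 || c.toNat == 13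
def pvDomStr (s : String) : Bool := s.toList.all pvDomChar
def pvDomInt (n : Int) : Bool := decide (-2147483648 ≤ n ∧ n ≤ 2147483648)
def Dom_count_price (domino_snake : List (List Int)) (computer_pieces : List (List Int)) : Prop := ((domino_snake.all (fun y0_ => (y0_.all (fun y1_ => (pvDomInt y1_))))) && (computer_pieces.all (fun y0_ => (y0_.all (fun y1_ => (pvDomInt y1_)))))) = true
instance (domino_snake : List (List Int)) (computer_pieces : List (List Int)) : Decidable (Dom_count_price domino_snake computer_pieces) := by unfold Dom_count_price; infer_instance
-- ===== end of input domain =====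

-- B builds the 7-bucket histogram in one pass over the pieces instead of
-- flattening everything and rescanning the flattened list once per pip value 0-6.

-- ===== PORT A =====
-- total_list accumulated by '+=', then for one_price in range(7) an inner scan counts matches
def count_price (domino_snake : List (List Int)) (computer_pieces : List (List Int)) : List Int :=
  let total_list := domino_snake.foldl (fun acc one_p => acc ++ one_p) []
  let total_list := computer_pieces.foldl (fun acc one_p => acc ++ one_p) total_list
  (PySem.List.pyRange 0 7 1).foldl
    (fun price_list one_price =>
      price_list ++
        [total_list.foldl (fun one_price_total ii =>
            if one_price = ii then one_price_total + 1 else one_price_total) 0])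
    []

-- ===== PORT B =====
-- price_list[v] += 1  (in-range guard), one pass
def cpBump (price_list : List Int) (v : Int) : List Int :=
  if 0 ≤ v ∧ v < 7 then
    PySem.List.pySetD price_list v (PySem.List.pyGetD price_list v 0 + 1)
  else price_list

def count_price_alt (domino_snake : List (List Int)) (computer_pieces : List (List Int)) : List Int :=
  let price_list : List Int := List.replicate 7 0
  let price_list := domino_snake.foldl (fun acc piece => piece.foldl cpBump acc) price_list
  computer_pieces.foldl (fun acc piece => piece.foldl cpBump acc) price_list

-- ===== PRECONDITION & SPEC =====
def Spec_count_price (domino_snake : List (List Int)) (computer_pieces : List (List Int)) (out : List Int) : Prop := out = count_price_alt domino_snake computer_pieces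
instance (domino_snake : List (List Int)) (computer_pieces : List (List Int)) (out : List Int) : Decidable (Spec_count_price domino_snake computer_pieces out) := by unfold Spec_count_price; infer_instance

-- ===== CLAIM (what is proved, stated in full; the proofs are below) =====
def Claim_equal_count_price : Prop := ∀ (domino_snake : List (List Int)) (computer_pieces : List (List Int)), Dom_count_price domino_snake computer_pieces → Spec_count_price domino_snake computer_pieces (count_price domino_snake computer_pieces)

-- ===== LEMMAS AND PROOFS =====

-- A's '+=' accumulation is flatten
theorem cp_foldl_append (l : List (List Int)) (acc : List Int) :
    l.foldl (fun acc one_p => acc ++ one_p) acc = acc ++ l.flatten := by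
  induction l generalizing acc with
  | nil => simp
  | cons x xs ih => simp [List.foldl_cons, ih, List.append_assoc]

-- B's nested pass over pieces is a flat pass over the flatten
theorem cp_foldl_pieces (l : List (List Int)) (acc : List Int) :
    l.foldl (fun acc piece => piece.foldl cpBump acc) acc = l.flatten.foldl cpBump acc := by
  induction l generalizing acc with
  | nil => rfl
  | cons x xs ih => simp [List.foldl_cons, ih, List.foldl_append]

theorem cpBump_length (h : List Int) (v : Int) : (cpBump h v).length = h.length := by
  unfold cpBump PySem.List.pySetD PySem.List.pySet? PySem.List.pyIdx?
  repeat' split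
  all_goals simp

theorem cp_foldl_length (vs : List Int) (h : List Int) :
    (vs.foldl cpBump h).length = h.length := by
  induction vs generalizing h with
  | nil => rfl
  | cons v vs ih => simp [List.foldl_cons, ih, cpBump_length]

theorem cpBump_getD (h : List Int) (v : Int) (i : Nat) (hi : i < h.length)
    (hlen : h.length ≤ 7) :
    (cpBump h v).getD i 0 = h.getD i 0 + (if v = (i : Int) then 1 else 0) := by
  unfold cpBump
  by_cases hv : 0 ≤ v ∧ v < 7
  · rw [if_pos hv]
    by_cases hlt : v < (h.length : Int)
    · have hset : PySem.List.pySetD h v (PySem.List.pyGetD h v 0 + 1) =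
          h.set v.toNat (PySem.List.pyGetD h v 0 + 1) := by
        simp [PySem.List.pySetD, PySem.List.pySet?, PySem.List.pyIdx?, hv.1, hlt]
      rw [hset, PySem.List.pyGetD_eq_getElem h 0 hv.1 hlt]
      by_cases hiv : v = (i : Int)
      · have hti : v.toNat = i := by omega
        simp [List.getD_eq_getElem?_getD, hiv, hi]
      · have hne : v.toNat ≠ i := by omega
        simp [List.getD_eq_getElem?_getD, hne, hiv]
    · have hset : PySem.List.pySetD h v (PySem.List.pyGetD h v 0 + 1) = h := by
        simp [PySem.List.pySetD, PySem.List.pySet?, PySem.List.pyIdx?, hv.1, hlt]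
      have hiv : v ≠ (i : Int) := by
        have : (i : Int) < (h.length : Int) := by exact_mod_cast hi
        omega
      rw [hset]; simp [hiv]
  · rw [if_neg hv]
    have hiv : v ≠ (i : Int) := by
      intro he
      exact hv ⟨by omega, by omega⟩
    simp [hiv]

theorem cp_foldl_getD (vs : List Int) (h : List Int) (i : Nat) (hi : i < h.length)
    (hlen : h.length ≤ 7) :
    (vs.foldl cpBump h).getD i 0 =
      h.getD i 0 + (vs.countP (fun v => v = (i : Int)) : Int) := by
  induction vs generalizing h with
  | nil => simp
  | cons v vs ih =>
    rw [List.foldl_cons,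
      ih (cpBump h v) (by rw [cpBump_length]; exact hi) (by rw [cpBump_length]; exact hlen),
      cpBump_getD h v i hi hlen, List.countP_cons]
    by_cases hv : v = (i : Int) <;> simp [hv] <;> try ring

-- A's inner scan is countP
theorem cp_count_scan (p : Int) (l : List Int) :
    l.foldl (fun t ii => if p = ii then t + 1 else t) 0 =
      (l.countP (fun v => v = p) : Int) := by
  have hc := PySem.List.foldl_count_if (fun ii => p == ii) l 0
  simp only [beq_iff_eq] at hc
  rw [hc, zero_add]
  congr 1
  apply List.countP_congr
  intro x _
  by_cases hpx : p = x
  · simp [hpx]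
  · have hxp : ¬ x = p := fun h => hpx h.symm
    simp [hpx, hxp]

-- ===== VERDICT (by name: the statement is the Claim_ definition above) =====
theorem count_price_spec : Claim_equal_count_price := by
  intro ds cs _
  unfold Spec_count_price
  show count_price ds cs = count_price_alt ds cs
  have hA : count_price ds cs =
      (PySem.List.pyRange 0 7 1).foldl
        (fun price_list one_price => price_list ++
          [(cs.foldl (fun acc one_p => acc ++ one_p)
              (ds.foldl (fun acc one_p => acc ++ one_p) [])).foldl
            (fun t ii => if one_price = ii then t + 1 else t) 0]) [] := rfl
  have hBdef : count_price_alt ds cs =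
      cs.foldl (fun acc piece => piece.foldl cpBump acc)
        (ds.foldl (fun acc piece => piece.foldl cpBump acc) (List.replicate 7 0)) := rfl
  set total := ds.flatten ++ cs.flatten with htot
  have hTL : cs.foldl (fun acc one_p => acc ++ one_p)
      (ds.foldl (fun acc one_p => acc ++ one_p) []) = total := by
    rw [cp_foldl_append, cp_foldl_append, List.nil_append]
  have hrange : PySem.List.pyRange 0 7 1 = [0, 1, 2, 3, 4, 5, 6] := by decide
  rw [hA, hBdef, cp_foldl_pieces, cp_foldl_pieces, hrange]
  simp only [hTL]
  rw [← List.foldl_append, ← htot]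
  set B := total.foldl cpBump (List.replicate 7 0) with hB
  have hBlen : B.length = 7 := by
    rw [hB, cp_foldl_length, List.length_replicate]
  have hBget : ∀ (i : Nat), i < 7 →
      B.getD i 0 = (total.countP (fun v => v = (i : Int)) : Int) := by
    intro i hi
    rw [hB, cp_foldl_getD _ _ i (by simpa using hi) (by simp)]
    have hz : (List.replicate 7 (0 : Int)).getD i 0 = 0 := by
      interval_cases i <;> rfl
    rw [hz, zero_add]
  have hAmap : ([0, 1, 2, 3, 4, 5, 6].foldl
      (fun price_list one_price => price_list ++
        [total.foldl (fun t ii => if one_price = ii then t + 1 else t) 0]) ([] : List Int))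
      = [0, 1, 2, 3, 4, 5, 6].map (fun p => (total.countP (fun v => v = p) : Int)) := by
    simp only [List.foldl_cons, List.foldl_nil, List.map_cons, List.map_nil, cp_count_scan]
    rfl
  rw [hAmap]
  apply List.ext_getElem
  · simp [hBlen]
  · intro i h1 h2
    have h7 : i < 7 := by rwa [hBlen] at h2
    conv_rhs => rw [← List.getD_eq_getElem B 0 h2]
    rw [hBget i h7]
    interval_cases i <;> simp
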